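-- pv_equiv track=rewrite | github.com/Stevehh251/CURSA4 | 2_classification/metrics.py | make_scores
-- ===== SOURCE A (Python) =====
-- def path_contains(x: list, y: list) -> bool:
--     '''
--         True if x contains y
--     '''
--     return x == y[:len(x)]
--
-- def path_intersection(x: list, y: list, all_xpath: list):
--     '''
--         return all xpaths contains in x and y
--     '''
--     intersection = []
--     for xpath in all_xpath:
--         if path_contains(x, xpath) and path_contains(y, xpath):
--             intersection.append(xpath)
--
--     return intersection
--
-- def path_minus(x: list, y: list, all_xpath: list):
--     '''
--         return x \ y = x & (!y)
--     '''
--     minus = []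
--     for xpath in all_xpath:
--         if path_contains(x, xpath) and (not path_contains(y, xpath)):
--             minus.append(xpath)
--
--     return minus
--
-- def make_scores(segments_true: list, segments_pred: list, all_xpaths: list):
--     '''
--         Сначала нужно как-то сопоставить узлы
--         Так как нумерация может отличаться
--         Для этого найдем для каждого правильного узла
--         предсказанный узел, в который он попадает
--     '''
--     all_xpaths = [xpath.split('/') for xpath in all_xpaths]
--     segments_true = [true_segment.split('/') for true_segment in segments_true]
--     segments_pred = [predict.split('/') for predict in segments_pred]
--
--     segment_scores = []
--     for true_segment in segments_true:
--         flag = 1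
--         for predict in segments_pred:
--             if len(path_intersection(predict, true_segment, all_xpaths)) != 0:
--                 TP = len(path_intersection(predict, true_segment, all_xpaths))
--                 FP = len(path_minus(predict, true_segment, all_xpaths))
--                 FN = len(path_minus(true_segment, predict, all_xpaths))
--                 segment_scores.append({"TP": TP,
--                                        "FP": FP,
--                                        "FN": FN})
--                 flag = 0
--         if flag:
--             segment_scores.append({"TP": 0,
--                                    "FP": 0,
--                                    "FN": 0})
--
--     return segment_scores
-- ===== SOURCE B (Python) =====
-- def make_scores(segments_true: list, segments_pred: list, all_xpaths: list):
--     # Split every string once, precompute one boolean containment mask per segment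
--     # (mask[i] = segment is a '/'-prefix of all_xpaths[i]); each (true, pred) pair
--     # then needs only cheap boolean counting over the masks.
--     axs = [x.split('/') for x in all_xpaths]
--
--     def mask(seg):
--         p = seg.split('/')
--         n = len(p)
--         return [xp[:n] == p for xp in axs]
--
--     pmasks = [mask(s) for s in segments_pred]
--     out = []
--     for t in segments_true:
--         tm = mask(t)
--         rows = []
--         for pm in pmasks:
--             tp = sum(1 for a, b in zip(pm, tm) if a and b)
--             if tp:
--                 fp = sum(1 for a, b in zip(pm, tm) if a and not b)
--                 fn = sum(1 for b, a in zip(tm, pm) if b and not a)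
--                 rows.append({"TP": tp, "FP": fp, "FN": fn})
--         out.extend(rows if rows else [{"TP": 0, "FP": 0, "FN": 0}])
--     return out
-- ===== Notes on version B (the rewrite author's own statement) =====
-- stated objective: faster
-- what changed: B splits every string once and precomputes a boolean prefix-containment mask per segment over all_xpaths, so each (true, pred) pair is scored by counting over two masks instead of re-splitting and re-scanning all xpaths with list-prefix comparisons three times per pair.
import Mathlib
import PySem

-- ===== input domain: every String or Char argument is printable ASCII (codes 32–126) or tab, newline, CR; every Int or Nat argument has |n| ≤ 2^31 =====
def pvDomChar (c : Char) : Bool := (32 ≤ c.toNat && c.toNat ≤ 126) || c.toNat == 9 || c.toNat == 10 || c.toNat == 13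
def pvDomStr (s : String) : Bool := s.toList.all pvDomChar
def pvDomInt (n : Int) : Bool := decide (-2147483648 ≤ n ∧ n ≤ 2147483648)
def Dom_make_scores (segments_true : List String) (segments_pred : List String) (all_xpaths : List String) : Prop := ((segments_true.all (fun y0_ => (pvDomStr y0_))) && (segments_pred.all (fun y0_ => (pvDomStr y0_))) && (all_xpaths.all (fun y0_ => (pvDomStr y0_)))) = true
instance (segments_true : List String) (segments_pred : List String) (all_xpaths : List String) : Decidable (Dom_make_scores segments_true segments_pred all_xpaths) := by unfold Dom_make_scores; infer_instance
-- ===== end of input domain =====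

-- B precomputes one boolean prefix-containment mask per segment so each (true, pred)
-- pair is scored by counting over two masks instead of re-scanning all xpaths with
-- list-prefix comparisons; proved to return exactly A's value on all of Dom.

-- s.split('/') — separator is nonempty, so Python's split never raises and split? is always `some`
def pySplitSlash (s : String) : List String := (PySem.Str.split? s "/").getD []

-- ===== PORT A =====
-- x == y[:len(x)]
def path_contains (x y : List String) : Bool := x == PySem.List.slice y none (some (x.length : Int))

def path_intersection (x y : List String) (all_xpath : List (List String)) : List (List String) :=
  all_xpath.foldl (fun acc xpath =>
    if path_contains x xpath && path_contains y xpath then acc ++ [xpath] else acc) []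

def path_minus (x y : List String) (all_xpath : List (List String)) : List (List String) :=
  all_xpath.foldl (fun acc xpath =>
    if path_contains x xpath && !path_contains y xpath then acc ++ [xpath] else acc) []

def make_scores (segments_true : List String) (segments_pred : List String) (all_xpaths : List String) : List (List (String × Int)) :=
  let all_xpaths' := all_xpaths.map pySplitSlash
  let segments_true' := segments_true.map pySplitSlash
  let segments_pred' := segments_pred.map pySplitSlash
  segments_true'.foldl (fun segment_scores true_segment =>
    let res := segments_pred'.foldl (fun (acc : List (List (String × Int)) × Int) predict =>
      if ((path_intersection predict true_segment all_xpaths').length : Int) ≠ 0 then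
        (acc.1 ++ [[("TP", ((path_intersection predict true_segment all_xpaths').length : Int)),
                    ("FP", ((path_minus predict true_segment all_xpaths').length : Int)),
                    ("FN", ((path_minus true_segment predict all_xpaths').length : Int))]], 0)
      else acc) (segment_scores, (1 : Int))
    if res.2 ≠ 0 then res.1 ++ [[("TP", 0), ("FP", 0), ("FN", 0)]] else res.1) []

-- ===== PORT B =====
def maskOf (axs : List (List String)) (seg : String) : List Bool :=
  let p := pySplitSlash seg
  axs.map (fun xp => xp.take p.length == p)

def make_scores_alt (segments_true : List String) (segments_pred : List String) (all_xpaths : List String) : List (List (String × Int)) :=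
  let axs := all_xpaths.map pySplitSlash
  let pmasks := segments_pred.map (maskOf axs)
  segments_true.foldl (fun out t =>
    let tm := maskOf axs t
    let rows := pmasks.foldl (fun rows pm =>
      if ((pm.zip tm).countP (fun ab => ab.1 && ab.2) : Int) ≠ 0 then
        rows ++ [[("TP", ((pm.zip tm).countP (fun ab => ab.1 && ab.2) : Int)),
                  ("FP", ((pm.zip tm).countP (fun ab => ab.1 && !ab.2) : Int)),
                  ("FN", ((tm.zip pm).countP (fun ab => ab.1 && !ab.2) : Int))]]
      else rows) []
    out ++ (if rows = [] then [[("TP", 0), ("FP", 0), ("FN", 0)]] else rows)) []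

-- ===== PRECONDITION & SPEC =====
def Spec_make_scores (segments_true : List String) (segments_pred : List String) (all_xpaths : List String) (out : List (List (String × Int))) : Prop := out = make_scores_alt segments_true segments_pred all_xpaths
instance (segments_true : List String) (segments_pred : List String) (all_xpaths : List String) (out : List (List (String × Int))) : Decidable (Spec_make_scores segments_true segments_pred all_xpaths out) := by unfold Spec_make_scores; infer_instance

-- ===== CLAIM (what is proved, stated in full; the proofs are below) =====
def Claim_equal_make_scores : Prop := ∀ (segments_true : List String) (segments_pred : List String) (all_xpaths : List String), Dom_make_scores segments_true segments_pred all_xpaths → Spec_make_scores segments_true segments_pred all_xpaths (make_scores segments_true segments_pred all_xpaths)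

-- ===== LEMMAS AND PROOFS =====

theorem path_contains_eq (x y : List String) :
    path_contains x y = (y.take x.length == x) := by
  simp [path_contains, PySem.List.slice_to_natCast, eq_comm]

theorem len_path_intersection (x y : List String) (all : List (List String)) :
    (path_intersection x y all).length
      = all.countP (fun xp => (xp.take x.length == x) && (xp.take y.length == y)) := by
  unfold path_intersection
  rw [PySem.List.foldl_append_if_eq_filter]
  simp only [List.nil_append, List.countP_eq_length_filter]
  congr 1
  apply List.filter_congr
  intro xp _
  rw [path_contains_eq, path_contains_eq]

theorem len_path_minus (x y : List String) (all : List (List String)) :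
    (path_minus x y all).length
      = all.countP (fun xp => (xp.take x.length == x) && !(xp.take y.length == y)) := by
  unfold path_minus
  rw [PySem.List.foldl_append_if_eq_filter]
  simp only [List.nil_append, List.countP_eq_length_filter]
  congr 1
  apply List.filter_congr
  intro xp _
  rw [path_contains_eq, path_contains_eq]

theorem countP_zip_maskOf (axs : List (List String)) (s t : String) (q : Bool → Bool → Bool) :
    ((maskOf axs s).zip (maskOf axs t)).countP (fun ab => q ab.1 ab.2)
      = axs.countP (fun xp => q (xp.take (pySplitSlash s).length == pySplitSlash s)
                               (xp.take (pySplitSlash t).length == pySplitSlash t)) := by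
  simp [maskOf, List.zip_map', List.countP_map, Function.comp_def]

-- named pieces of A's and B's per-true-segment work (proof-side abbreviations only)
def zeroRow : List (String × Int) := [("TP", 0), ("FP", 0), ("FN", 0)]

def rowA (all : List (List String)) (t p : List String) : List (String × Int) :=
  [("TP", ((path_intersection p t all).length : Int)),
   ("FP", ((path_minus p t all).length : Int)),
   ("FN", ((path_minus t p all).length : Int))]

def rowsA (all : List (List String)) (sp' : List (List String)) (t : List String) : List (List (String × Int)) :=
  (sp'.filter (fun p => (path_intersection p t all).length ≠ 0)).map (rowA all t)

def rowB (tm pm : List Bool) : List (String × Int) :=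
  [("TP", ((pm.zip tm).countP (fun ab => ab.1 && ab.2) : Int)),
   ("FP", ((pm.zip tm).countP (fun ab => ab.1 && !ab.2) : Int)),
   ("FN", ((tm.zip pm).countP (fun ab => ab.1 && !ab.2) : Int))]

def rowsB (tm : List Bool) (pmasks : List (List Bool)) : List (List (String × Int)) :=
  (pmasks.filter (fun pm => (pm.zip tm).countP (fun ab => ab.1 && ab.2) ≠ 0)).map (rowB tm)

theorem rowsA_cons_pos {all : List (List String)} {p t : List String} {ps : List (List String)}
    (h : (path_intersection p t all).length ≠ 0) :
    rowsA all (p :: ps) t = rowA all t p :: rowsA all ps t := by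
  unfold rowsA
  rw [List.filter_cons, if_pos (by simpa using h), List.map_cons]

theorem rowsA_cons_neg {all : List (List String)} {p t : List String} {ps : List (List String)}
    (h : (path_intersection p t all).length = 0) :
    rowsA all (p :: ps) t = rowsA all ps t := by
  unfold rowsA
  rw [List.filter_cons, if_neg (by simp [h])]

theorem rowsB_cons_pos {tm pm : List Bool} {ps : List (List Bool)}
    (h : (pm.zip tm).countP (fun ab => ab.1 && ab.2) ≠ 0) :
    rowsB tm (pm :: ps) = rowB tm pm :: rowsB tm ps := by
  unfold rowsB
  rw [List.filter_cons, if_pos (by simpa using h), List.map_cons]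

theorem rowsB_cons_neg {tm pm : List Bool} {ps : List (List Bool)}
    (h : (pm.zip tm).countP (fun ab => ab.1 && ab.2) = 0) :
    rowsB tm (pm :: ps) = rowsB tm ps := by
  unfold rowsB
  rw [List.filter_cons, if_neg (by simp [h])]

-- generic fold shape: a body of the form 'acc ++ g t'
theorem fold_shape {α β : Type} (g : α → List β) (f : List β → α → List β)
    (h : ∀ acc t, f acc t = acc ++ g t) (l : List α) (init : List β) :
    l.foldl f init = init ++ l.flatMap g := by
  have hf : f = fun acc t => acc ++ g t := by funext acc t; exact h acc t
  rw [hf, PySem.List.foldl_append_eq_flatMap]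

-- the inner pair-fold of A, characterised
theorem inner_A (all : List (List String)) (t : List String)
    (sp : List (List String)) (scores : List (List (String × Int))) (flag : Int) :
    sp.foldl (fun (acc : List (List (String × Int)) × Int) predict =>
      if ((path_intersection predict t all).length : Int) ≠ 0 then
        (acc.1 ++ [[("TP", ((path_intersection predict t all).length : Int)),
                    ("FP", ((path_minus predict t all).length : Int)),
                    ("FN", ((path_minus t predict all).length : Int))]], 0)
      else acc) (scores, flag)
    = (scores ++ rowsA all sp t,
       if rowsA all sp t = [] then flag else 0) := by
  induction sp generalizing scores flag with
  | nil => simp [rowsA]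

  | cons p ps ih =>
    simp only [List.foldl_cons]
    by_cases h : (path_intersection p t all).length = 0
    · rw [if_neg (by simp [h]), ih, rowsA_cons_neg h]
    · rw [if_pos (by simpa using h), ih, rowsA_cons_pos h]
      simp [rowA, List.append_assoc]

-- the inner rows-fold of B, characterised
theorem inner_B (tm : List Bool) (pmasks : List (List Bool)) (rows : List (List (String × Int))) :
    pmasks.foldl (fun rows pm =>
      if ((pm.zip tm).countP (fun ab => ab.1 && ab.2) : Int) ≠ 0 then
        rows ++ [[("TP", ((pm.zip tm).countP (fun ab => ab.1 && ab.2) : Int)),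
                  ("FP", ((pm.zip tm).countP (fun ab => ab.1 && !ab.2) : Int)),
                  ("FN", ((tm.zip pm).countP (fun ab => ab.1 && !ab.2) : Int))]]
      else rows) rows
    = rows ++ rowsB tm pmasks := by
  induction pmasks generalizing rows with
  | nil => simp [rowsB]
  | cons pm ps ih =>
    simp only [List.foldl_cons]
    by_cases h : (pm.zip tm).countP (fun ab => ab.1 && ab.2) = 0
    · rw [if_neg (by simp [h]), ih, rowsB_cons_neg h]
    · rw [if_pos (by simpa using h), ih, rowsB_cons_pos h]
      simp [rowB, List.append_assoc]

-- B's row list over masks equals A's row list over splits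
theorem rowsB_eq_rowsA (all : List (List String)) (sp : List String) (t : String) :
    rowsB (maskOf all t) (sp.map (maskOf all))
      = rowsA all (sp.map pySplitSlash) (pySplitSlash t) := by
  have hTP : ∀ s : String,
      ((maskOf all s).zip (maskOf all t)).countP (fun ab => ab.1 && ab.2)
        = (path_intersection (pySplitSlash s) (pySplitSlash t) all).length := by
    intro s; rw [countP_zip_maskOf all s t (fun a b => a && b), len_path_intersection]
  have hFP : ∀ s u : String,
      ((maskOf all s).zip (maskOf all u)).countP (fun ab => ab.1 && !ab.2)
        = (path_minus (pySplitSlash s) (pySplitSlash u) all).length := by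
    intro s u; rw [countP_zip_maskOf all s u (fun a b => a && !b), len_path_minus]
  unfold rowsB rowsA
  rw [List.filter_map, List.map_map, List.filter_map, List.map_map]
  have h1 : ((fun pm => decide ((pm.zip (maskOf all t)).countP (fun ab => ab.1 && ab.2) ≠ 0)) ∘ maskOf all)
      = ((fun p => decide ((path_intersection p (pySplitSlash t) all).length ≠ 0)) ∘ pySplitSlash) := by
    funext s; simp only [Function.comp_def, hTP s]
  rw [h1]
  apply List.map_congr_left
  intro s _
  simp only [Function.comp_def, rowB, rowA, hTP s, hFP s t, hFP t s]

-- ===== VERDICT (by name: the statement is the Claim_ definition above) =====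
theorem make_scores_spec : Claim_equal_make_scores := by
  intro st sp ax _
  unfold Spec_make_scores
  simp only [make_scores, make_scores_alt]
  rw [fold_shape (fun t =>
        if rowsA (ax.map pySplitSlash) (sp.map pySplitSlash) t = [] then [zeroRow]
        else rowsA (ax.map pySplitSlash) (sp.map pySplitSlash) t) _
      (fun acc t => by
        rw [inner_A]
        by_cases h : rowsA (ax.map pySplitSlash) (sp.map pySplitSlash) t = [] <;>
          simp [h, zeroRow]) _ [],
      fold_shape (fun t =>
        if rowsA (ax.map pySplitSlash) (sp.map pySplitSlash) (pySplitSlash t) = [] then [zeroRow]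
        else rowsA (ax.map pySplitSlash) (sp.map pySplitSlash) (pySplitSlash t)) _
      (fun acc t => by
        rw [inner_B, rowsB_eq_rowsA]
        by_cases h : rowsA (ax.map pySplitSlash) (sp.map pySplitSlash) (pySplitSlash t) = [] <;>
          simp [h, zeroRow]) _ []]
  simp only [List.flatMap_map, List.nil_append]
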